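-- pv_equiv track=rewrite | github.com/seohyunaum/CS1301 | HW09.py | balancedStr
-- ===== SOURCE A (Python) =====
-- def balancedStr(astr):
--     if len(astr) == 0:
--         return True
--     else:
--         result = False
--         first = astr[0].islower() and astr[-1].islower()
--         second = astr[0].isupper() and astr[-1].isupper()
--         if first or second:
--             return balancedStr(astr[1:-1])
--         else:
--             return False
-- ===== SOURCE B (Python) =====
-- def balancedStr(astr):
--     h = (len(astr) + 1) // 2
--     rev = astr[::-1]
--     return all((a.islower() and b.islower()) or (a.isupper() and b.isupper())
--                for a, b in zip(astr[:h], rev[:h]))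
-- ===== Notes on version B (the rewrite author's own statement) =====
-- stated objective: faster
-- what changed: Replaces the recursion that strips one character off each end (rebuilding a slice per step) with a single pass that zips the first half of the string against the first half of its reversal and checks every pair's case match.
import Mathlib
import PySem

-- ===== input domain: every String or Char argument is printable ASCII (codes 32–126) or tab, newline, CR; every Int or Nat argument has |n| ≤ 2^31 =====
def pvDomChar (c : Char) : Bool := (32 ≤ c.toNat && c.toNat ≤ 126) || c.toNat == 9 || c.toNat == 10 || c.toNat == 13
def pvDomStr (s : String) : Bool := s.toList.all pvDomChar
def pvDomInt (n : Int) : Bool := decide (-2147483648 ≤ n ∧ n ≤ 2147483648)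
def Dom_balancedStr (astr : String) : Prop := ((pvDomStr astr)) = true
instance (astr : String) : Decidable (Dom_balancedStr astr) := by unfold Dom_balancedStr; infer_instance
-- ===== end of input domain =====

-- B replaces A's end-stripping recursion by one zip pass over the half string (asymptotically faster; return value only, no side effects involved).

-- ===== PORT A =====
-- A's recursion on the string, transcribed on the code-point list:
-- astr[0] / astr[-1] are head/getLast of the nonempty list, astr[1:-1] is tail.dropLast
-- (PySem.List.slice l (some 1) (some (-1)) = l.tail.dropLast).
def balancedStrList : List Char → Bool
  | [] => true
  | c :: rest =>
    let lastC := (c :: rest).getLast (by simp)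
    let first := PySem.Chars.islower c && PySem.Chars.islower lastC
    let second := PySem.Chars.isupper c && PySem.Chars.isupper lastC
    if first || second then balancedStrList ((c :: rest).tail.dropLast) else false
termination_by l => l.length
decreasing_by simp [List.length_dropLast]

def balancedStr (astr : String) : Bool := balancedStrList astr.toList

-- ===== PORT B =====
def balancedStr_alt (astr : String) : Bool :=
  let l := astr.toList
  let h := (l.length + 1) / 2
  ((l.take h).zip (l.reverse.take h)).all
    (fun p => (PySem.Chars.islower p.1 && PySem.Chars.islower p.2) ||
              (PySem.Chars.isupper p.1 && PySem.Chars.isupper p.2))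

-- ===== PRECONDITION & SPEC =====
def Spec_balancedStr (astr : String) (out : Bool) : Prop := out = balancedStr_alt astr
instance (astr : String) (out : Bool) : Decidable (Spec_balancedStr astr out) := by unfold Spec_balancedStr; infer_instance

-- ===== CLAIM (what is proved, stated in full; the proofs are below) =====
def Claim_equal_balancedStr : Prop := ∀ (astr : String), Dom_balancedStr astr → Spec_balancedStr astr (balancedStr astr)

-- ===== LEMMAS AND PROOFS =====
def pvOk (c d : Char) : Bool :=
  (PySem.Chars.islower c && PySem.Chars.islower d) ||
  (PySem.Chars.isupper c && PySem.Chars.isupper d)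

def pvAltList (l : List Char) : Bool :=
  ((l.take ((l.length + 1) / 2)).zip (l.reverse.take ((l.length + 1) / 2))).all
    (fun p => pvOk p.1 p.2)

lemma pvNil : balancedStrList [] = true := by rw [balancedStrList.eq_def]

lemma pvMain : ∀ (n : Nat) (l : List Char), l.length ≤ n → balancedStrList l = pvAltList l := by
  intro n
  induction n with
  | zero =>
    intro l hl
    have : l = [] := List.eq_nil_of_length_eq_zero (Nat.le_zero.mp hl)
    subst this
    simp [pvNil, pvAltList]
  | succ n ih =>
    intro l hl
    match l with
    | [] => simp [pvNil, pvAltList]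
    | [c] =>
      rw [balancedStrList.eq_def]
      simp [pvNil, pvAltList, pvOk, List.all]
    | c :: x :: rest =>
      -- write the tail as mid ++ [d]
      obtain ⟨mid, d, hmd⟩ : ∃ mid d, x :: rest = mid ++ [d] := by
        rcases List.eq_nil_or_concat (x :: rest) with h | ⟨mid, d, h⟩
        · simp at h
        · exact ⟨mid, d, by simpa [List.concat_eq_append] using h⟩
      rw [hmd]
      -- A-side step
      have hA : balancedStrList (c :: (mid ++ [d])) =
          (if pvOk c d then balancedStrList mid else false) := by
        rw [balancedStrList.eq_def]
        simp [pvOk]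
      -- B-side step
      have hB : pvAltList (c :: (mid ++ [d])) = (pvOk c d && pvAltList mid) := by
        unfold pvAltList
        have h2 : (mid.length + 1) / 2 ≤ mid.length := by omega
        have e : ((c :: (mid ++ [d])).length + 1) / 2 = (mid.length + 1) / 2 + 1 := by
          simp; omega
        have r1 : (c :: (mid ++ [d])).reverse = d :: (mid.reverse ++ [c]) := by simp
        rw [e, r1]
        simp only [List.take_succ_cons]
        rw [List.take_append_of_le_length h2,
          List.take_append_of_le_length
            (show (mid.length + 1) / 2 ≤ mid.reverse.length by simpa using h2)]
        simp [List.zip]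
      rw [hA, hB]
      have hmidlen : mid.length ≤ n := by
        have := hl; rw [hmd] at this; simp at this; omega
      rw [ih mid hmidlen]
      by_cases h : pvOk c d <;> simp [h]

-- ===== VERDICT (by name: the statement is the Claim_ definition above) =====
theorem balancedStr_spec : Claim_equal_balancedStr := by
  intro astr _
  unfold Spec_balancedStr balancedStr balancedStr_alt
  have := pvMain astr.toList.length astr.toList le_rfl
  simpa [pvAltList, pvOk] using this
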